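-- pv_equiv track=rewrite | github.com/lixpng/cart_bayesian_py | cart.py | get_real_sub_set
-- ===== SOURCE A (Python) =====
-- def get_real_sub_set(items): #获取一个集合的真子集
--     res = []
--     n = len(items)
--     for i in range(1, 2**n-1):
--         combo = []
--         for j in range(n):
--             if(i >> j ) % 2 == 1:
--                 combo.append(items[j])
--         res.append(combo)
--     return res;
-- ===== SOURCE B (Python) =====
-- def get_real_sub_set(items):
--     res = [[]]
--     for item in items:
--         res = res + [s + [item] for s in res]
--     return res[1:-1]
-- ===== Notes on version B (the rewrite author's own statement) =====
-- stated objective: alternative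
-- what changed: Replaces the bitmask double loop (for each of 2^n masks, scan all n bit positions and index into items) by incremental power-set doubling (res = res + [s+[item] for s in res]) followed by positional trimming res[1:-1]; no explicit masks or indexing remain.
import Mathlib
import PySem

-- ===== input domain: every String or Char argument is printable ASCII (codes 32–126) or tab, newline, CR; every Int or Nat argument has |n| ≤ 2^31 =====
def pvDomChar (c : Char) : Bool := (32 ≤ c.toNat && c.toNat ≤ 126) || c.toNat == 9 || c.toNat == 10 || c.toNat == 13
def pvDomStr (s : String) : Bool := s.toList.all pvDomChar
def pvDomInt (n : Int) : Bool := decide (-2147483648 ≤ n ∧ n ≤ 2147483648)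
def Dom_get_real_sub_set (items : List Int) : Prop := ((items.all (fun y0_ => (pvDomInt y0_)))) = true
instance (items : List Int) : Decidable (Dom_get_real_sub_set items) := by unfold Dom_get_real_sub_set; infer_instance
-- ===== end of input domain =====

-- B replaces A's bitmask double loop by power-set doubling plus the positional trim res[1:-1] (a different decomposition of the same enumeration, similar cost).

-- ===== PORT A =====
-- literal port: for i in range(1, 2**n-1): for j in range(n): if (i >> j) % 2 == 1: combo.append(items[j])
def get_real_sub_set (items : List Int) : List (List Int) :=
  let n : Int := items.length
  (PySem.List.pyRange 1 (2 ^ items.length - 1) 1).foldl (fun res i =>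
    res ++ [(PySem.List.pyRange 0 n 1).foldl (fun combo j =>
      if (i >>> j.toNat) % 2 == 1 then combo ++ [PySem.List.pyGetD items j 0] else combo) []]) []

-- ===== PORT B =====
-- literal port of Source B: res = [[]]; for item in items: res = res + [s + [item] for s in res]; return res[1:-1]
def get_real_sub_set_alt (items : List Int) : List (List Int) :=
  let res := items.foldl (fun res item => res ++ res.map (fun s => s ++ [item])) [[]]
  PySem.List.slice res (some 1) (some (-1))

-- ===== PRECONDITION & SPEC =====
def Spec_get_real_sub_set (items : List Int) (out : List (List Int)) : Prop := out = get_real_sub_set_alt items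
instance (items : List Int) (out : List (List Int)) : Decidable (Spec_get_real_sub_set items out) := by unfold Spec_get_real_sub_set; infer_instance

-- ===== CLAIM (what is proved, stated in full; the proofs are below) =====
def Claim_equal_get_real_sub_set : Prop := ∀ (items : List Int), Dom_get_real_sub_set items → Spec_get_real_sub_set items (get_real_sub_set items)

-- ===== LEMMAS AND PROOFS =====

-- the subset selected by mask m (bit j of m picks the j-th element), elements in index order
def comboN (m : Nat) : List Int → List Int
  | [] => []
  | x :: xs => if m % 2 = 1 then x :: comboN (m / 2) xs else comboN (m / 2) xs

-- power set in the doubling order (= increasing-bitmask order, bit 0 = head)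
def powerList : List Int → List (List Int)
  | [] => [[]]
  | x :: xs => (powerList xs).flatMap (fun s => [s, x :: s])

theorem foldl_doubling (xs : List Int) (acc : List (List Int)) :
    xs.foldl (fun res item => res ++ res.map (fun s => s ++ [item])) acc
      = (powerList xs).flatMap (fun s => acc.map (fun t => t ++ s)) := by
  induction xs generalizing acc with
  | nil => simp [powerList]
  | cons x xs ih =>
      simp only [List.foldl_cons, ih, powerList, List.flatMap_assoc]
      congr 1
      funext s
      simp [List.map_map, Function.comp, List.append_assoc]

theorem pvRange_two_mul (n : Nat) :
    List.range (2 * n) = (List.range n).flatMap (fun q => [2 * q, 2 * q + 1]) := by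
  induction n with
  | zero => simp
  | succ n ih =>
      have : 2 * (n + 1) = (2 * n + 1) + 1 := by omega
      rw [this, List.range_succ, List.range_succ, List.range_succ, ih]
      simp

theorem powerList_eq (xs : List Int) :
    powerList xs = (List.range (2 ^ xs.length)).map (fun m => comboN m xs) := by
  induction xs with
  | nil => simp [powerList, comboN]
  | cons x xs ih =>
      have hpow : 2 ^ (x :: xs).length = 2 * 2 ^ xs.length := by
        simp [List.length_cons, pow_succ]; ring
      rw [powerList, ih, hpow, pvRange_two_mul]
      simp only [List.flatMap_map, List.map_flatMap]
      congr 1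
      funext q
      have h1 : comboN (2 * q) (x :: xs) = comboN q xs := by
        simp [comboN, Nat.mul_mod_right, Nat.mul_div_cancel_left q (by norm_num : 0 < 2)]
      have h2 : comboN (2 * q + 1) (x :: xs) = x :: comboN q xs := by
        have hm : (2 * q + 1) % 2 = 1 := by omega
        have hd : (2 * q + 1) / 2 = q := by omega
        simp [comboN, hm, hd]
      simp [h1, h2]

-- A's inner loop computes comboN of the mask
theorem inner_eq_comboN (items : List Int) (m : Nat) :
    ((List.range items.length).filter (fun j => decide ((m >>> j) % 2 = 1))).map
        (fun j => items.getD j 0) = comboN m items := by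
  induction items generalizing m with
  | nil => simp [comboN]
  | cons x xs ih =>
      rw [List.length_cons, List.range_succ_eq_map]
      have e1 : ∀ j, m.testBit (j + 1) = (m / 2).testBit j := fun j => Nat.testBit_succ m j
      by_cases h0 : m % 2 = 1 <;>
        simp [h0, List.filter_map, List.map_map, Function.comp_def, comboN, e1, ← ih (m / 2)]

theorem slice_one_neg_one (xs : List (List Int)) :
    PySem.List.slice xs (some 1) (some (-1)) = ((xs.drop 1).take (xs.length - 2)) := by
  cases xs with
  | nil => simp [PySem.List.slice]
  | cons y ys =>
      simp [PySem.List.slice]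

-- A's inner loop (over pyRange, Int index and Int mask) equals comboN of the mask
theorem innerA_eq (items : List Int) (m : Nat) :
    (PySem.List.pyRange 0 (items.length : Int) 1).foldl
      (fun combo j => if ((m : Int) >>> (j.toNat : Nat)) % 2 == 1 then combo ++ [PySem.List.pyGetD items j 0] else combo) []
      = comboN m items := by
  rw [PySem.List.pyRange_zero_natCast, List.foldl_map]
  have hstep : ∀ (combo : List Int) (j : Nat),
      (if ((m : Int) >>> (((j : Int)).toNat : Nat)) % 2 == 1 then combo ++ [PySem.List.pyGetD items (j : Int) 0] else combo)
      = (if decide ((m >>> j) % 2 = 1) then combo ++ [items.getD j 0] else combo) := by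
    intro combo j
    rw [PySem.List.pyGetD_natCast, Int.toNat_natCast, ← Int.natCast_shiftRight]
    simp only [beq_iff_eq, decide_eq_true_eq]
    by_cases h : (m >>> j) % 2 = 1
    · rw [if_pos (by omega : ((m >>> j : Nat) : Int) % 2 = 1), if_pos h]
    · rw [if_neg (by omega : ¬ ((m >>> j : Nat) : Int) % 2 = 1), if_neg h]
  simp only [hstep]
  rw [PySem.List.foldl_append_if (fun j => decide ((m >>> j) % 2 = 1)) (fun j => items.getD j 0),
    List.nil_append]
  exact inner_eq_comboN items m

theorem drop_take_range (N : Nat) :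
    ((List.range N).drop 1).take (N - 2) = (List.range (N - 2)).map (fun k => 1 + k) := by
  apply List.ext_getElem
  · simp only [List.length_take, List.length_drop, List.length_range, List.length_map]
    omega
  · intro i h1 h2
    simp only [List.getElem_take, List.getElem_drop, List.getElem_range, List.getElem_map]

-- B's port equals the slice of the mask-ordered power set
theorem altB_eq (items : List Int) :
    get_real_sub_set_alt items
      = (((List.range (2 ^ items.length)).map (fun m => comboN m items)).drop 1).take (2 ^ items.length - 2) := by
  unfold get_real_sub_set_alt
  rw [foldl_doubling]
  have : (powerList items).flatMap (fun s => ([[]] : List (List Int)).map (fun t => t ++ s)) = powerList items := by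
    simp
  rw [this, powerList_eq, slice_one_neg_one]
  simp

-- ===== VERDICT (by name: the statement is the Claim_ definition above) =====
theorem get_real_sub_set_spec : Claim_equal_get_real_sub_set := by
  intro items _
  show get_real_sub_set items = get_real_sub_set_alt items
  rw [altB_eq]
  unfold get_real_sub_set
  rw [PySem.List.foldl_append_singleton_eq_map, PySem.List.pyRange_one 1 (2 ^ items.length - 1)]
  have hN : ((2 : Int) ^ items.length - 1 - 1).toNat = 2 ^ items.length - 2 := by
    have : ((2 : Int) ^ items.length) = ((2 ^ items.length : Nat) : Int) := by push_cast; ring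
    omega
  rw [hN, ← List.map_drop, ← List.map_take, drop_take_range, List.map_map, List.map_map]
  simp only [List.nil_append]
  apply List.map_congr_left
  intro k _
  have h1 : ((1 : Int) + (k : Int)) = (((1 + k : Nat)) : Int) := by push_cast; ring
  simp only [Function.comp_def, h1]
  exact innerA_eq items (1 + k)
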